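-- pv_equiv track=rewrite | github.com/pskv/Python-Projects | Small_tasks_for_practice/Enigma.py | check_commutation
-- ===== SOURCE A (Python) =====
-- def check_commutation(pairs):
--     used_symb = set()
--     for pair in pairs.upper().split():
--         if len(pair) != 2 or not pair.isalpha() or pair[0] in used_symb:
--             return False
--         used_symb.add(pair[0])
--         if pair[1] in used_symb:
--             return False
--         used_symb.add(pair[1])
--     return True
-- ===== SOURCE B (Python) =====
-- def check_commutation(pairs):
--     letters = []
--     for token in pairs.upper().split():
--         if len(token) != 2 or not token.isalpha():
--             return False
--         letters.extend(token)
--     return len(set(letters)) == len(letters)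
-- ===== Notes on version B (the rewrite author's own statement) =====
-- stated objective: alternative
-- what changed: B validates token shape in the loop but defers duplicate detection to one final len(set(letters)) == len(letters) check over all collected letters, instead of A's incremental per-character set-membership tests with early return inside the loop.
import Mathlib
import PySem

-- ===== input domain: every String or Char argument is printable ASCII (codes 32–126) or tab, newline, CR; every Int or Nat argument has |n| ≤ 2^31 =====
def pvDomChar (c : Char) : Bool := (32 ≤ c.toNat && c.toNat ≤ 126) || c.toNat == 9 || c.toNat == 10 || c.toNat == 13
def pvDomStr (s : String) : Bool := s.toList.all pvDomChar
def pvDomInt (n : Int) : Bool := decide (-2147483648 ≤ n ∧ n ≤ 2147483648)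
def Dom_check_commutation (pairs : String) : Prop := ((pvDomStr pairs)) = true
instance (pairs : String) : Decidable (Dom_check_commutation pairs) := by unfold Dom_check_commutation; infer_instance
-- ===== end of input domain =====

-- B differs from A only in decomposition: B collects all letters and checks duplicates once at the end,
-- A rejects duplicates incrementally with a membership set; return values agree everywhere.

-- ===== PORT A =====
-- A's loop: for pair in tokens: reject if len!=2 / not alpha / pair[0] seen; add pair[0]; reject if pair[1] seen; add pair[1].
def checkLoopA : List (List Char) → PySem.Set Char → Bool
  | [], _ => true
  | pair :: rest, used =>
    match pair with
    | [a, b] =>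
      if !PySem.Chars.strIsalpha [a, b] || PySem.Set.contains used a then false
      else
        let used' := PySem.Set.add used a
        if PySem.Set.contains used' b then false
        else checkLoopA rest (PySem.Set.add used' b)
    | _ => false    -- len(pair) != 2

def check_commutation (pairs : String) : Bool :=
  checkLoopA (PySem.Chars.split₀ (PySem.Chars.upper pairs.toList)) PySem.Set.empty

-- ===== PORT B =====
-- B's loop: validate each token (len 2, alpha) and extend `letters`; None models the early `return False`.
def collectB : List (List Char) → List Char → Option (List Char)
  | [], letters => some letters
  | tok :: rest, letters =>
    if tok.length != 2 || !PySem.Chars.strIsalpha tok then none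
    else collectB rest (letters ++ tok)

def check_commutation_alt (pairs : String) : Bool :=
  match collectB (PySem.Chars.split₀ (PySem.Chars.upper pairs.toList)) [] with
  | none => false
  | some letters => PySem.Set.len (PySem.Set.ofList letters) == letters.length

-- ===== PRECONDITION & SPEC =====
def Spec_check_commutation (pairs : String) (out : Bool) : Prop := out = check_commutation_alt pairs
instance (pairs : String) (out : Bool) : Decidable (Spec_check_commutation pairs out) := by unfold Spec_check_commutation; infer_instance

-- ===== CLAIM (what is proved, stated in full; the proofs are below) =====
def Claim_equal_check_commutation : Prop := ∀ (pairs : String), Dom_check_commutation pairs → Spec_check_commutation pairs (check_commutation pairs)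

-- ===== LEMMAS AND PROOFS =====

lemma collectB_acc (toks : List (List Char)) (acc : List Char) :
    collectB toks acc = (collectB toks []).map (acc ++ ·) := by
  induction toks generalizing acc with
  | nil => simp [collectB]
  | cons t rest ih =>
    simp only [collectB]
    split_ifs with h
    · rfl
    · rw [ih (acc ++ t), List.nil_append, ih t]
      cases collectB rest [] <;> simp

lemma length_ofList_eq_iff (ls : List Char) :
    (PySem.Set.ofList ls).length = ls.length ↔ ls.Nodup := by
  induction ls using List.reverseRecOn with
  | nil => simp
  | append_singleton xs x ih =>
    have hof : PySem.Set.ofList (xs ++ [x]) = PySem.Set.add (PySem.Set.ofList xs) x := by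
      simp [PySem.Set.ofList_eq_foldl]
    by_cases hx : x ∈ xs
    · have hmem : x ∈ PySem.Set.ofList xs := by
        rw [PySem.Set.mem_ofList]; exact hx
      have hle := PySem.Set.length_ofList_le (xs := xs)
      constructor
      · intro h
        rw [hof] at h
        simp [PySem.Set.add, PySem.Set.contains, hmem] at h
        omega
      · intro h
        exact absurd rfl ((List.nodup_append.mp h).2.2 x hx x (by simp))
    · have hmem : x ∉ PySem.Set.ofList xs := by
        rw [PySem.Set.mem_ofList]; exact hx
      rw [hof]
      have : PySem.Set.add (PySem.Set.ofList xs) x = PySem.Set.ofList xs ++ [x] := by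
        simp [PySem.Set.add, PySem.Set.contains, hmem]
      rw [this]
      simp only [List.length_append, List.length_singleton]
      rw [List.nodup_append]
      constructor
      · intro h
        refine ⟨ih.mp (by omega), List.nodup_singleton x, ?_⟩
        intro a hax y hy
        rw [List.mem_singleton] at hy
        subst hy
        exact fun h => hx (h ▸ hax)
      · intro ⟨h1, _, _⟩
        have := ih.mpr h1
        omega

lemma main_inv (toks : List (List Char)) (used : List Char) (hnd : used.Nodup) :
    checkLoopA toks used =
      match collectB toks [] with
      | none => false
      | some ls => decide ((used ++ ls).Nodup) := by
  induction toks generalizing used with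
  | nil => simpa [checkLoopA, collectB] using hnd
  | cons pair rest ih =>
    match pair with
    | [a, b] =>
      by_cases halpha : PySem.Chars.strIsalpha [a, b] = false
      · simp [checkLoopA, collectB, halpha]
      · have halpha' : PySem.Chars.strIsalpha [a, b] = true := by
          cases h : PySem.Chars.strIsalpha [a, b] <;> simp_all
        simp only [checkLoopA, collectB, halpha', Bool.not_true, Bool.false_or,
          List.length_cons, List.length_nil, List.nil_append]
        norm_num
        rw [collectB_acc rest [a, b]]
        by_cases ha : a ∈ used
        · simp only [ha, decide_true, Bool.not_true, Bool.false_and]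
          cases collectB rest [] with
          | none => rfl
          | some ls =>
            simp only [Option.map_some]
            have : ¬ (used ++ a :: b :: ls).Nodup := by
              intro h
              rcases List.nodup_append.mp h with ⟨_, _, hdisj⟩
              exact hdisj _ ha _ (by simp) rfl
            simp [this]
        · by_cases hb : b ∈ used
          · simp only [ha, hb, decide_true, decide_false, Bool.not_true, Bool.not_false,
              Bool.false_and, Bool.and_false]
            cases collectB rest [] with
            | none => rfl
            | some ls =>
              simp only [Option.map_some]
              have : ¬ (used ++ a :: b :: ls).Nodup := by
                intro h
                rcases List.nodup_append.mp h with ⟨_, _, hdisj⟩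
                exact hdisj _ hb _ (by simp) rfl
              simp [this]
          · by_cases hba : b = a
            · simp only [ha, hba, decide_true, decide_false, Bool.not_true, Bool.not_false,
                Bool.false_and, Bool.and_false]
              cases collectB rest [] with
              | none => rfl
              | some ls =>
                simp only [Option.map_some]
                have : ¬ (used ++ a :: a :: ls).Nodup := by
                  intro h
                  have h2 := (List.nodup_append.mp h).2.1
                  simp at h2
                simp [this]
            · simp only [ha, hb, hba, decide_false, Bool.not_false, Bool.true_and,
                Bool.and_true]
              have hadd2 : PySem.Set.add (PySem.Set.add used a) b = used ++ [a, b] := by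
                have h1 : PySem.Set.add used a = used ++ [a] := by
                  simp [PySem.Set.add, PySem.Set.contains, ha]
                have h2 : PySem.Set.contains (used ++ [a]) b = false := by
                  simp only [PySem.Set.contains, List.contains_append, Bool.or_eq_false_iff]
                  refine ⟨?_, ?_⟩ <;> simp [hb, hba]
                rw [h1]
                simp only [PySem.Set.add, h2, Bool.false_eq_true, if_false,
                  List.append_assoc, List.cons_append, List.nil_append]
              have hnd2 : (used ++ [a, b]).Nodup := by
                rw [List.nodup_append]
                refine ⟨hnd, by simp [Ne.symm hba], ?_⟩
                intro x hx y hy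
                rcases (by simpa using hy : y = a ∨ y = b) with rfl | rfl
                · exact fun h => ha (h ▸ hx)
                · exact fun h => hb (h ▸ hx)
              rw [hadd2, ih _ hnd2]
              cases collectB rest [] with
              | none => rfl
              | some ls => simp
    | [] => simp [checkLoopA, collectB]
    | [a] => simp [checkLoopA, collectB]
    | a :: b :: c :: tl => simp [checkLoopA, collectB]

-- ===== VERDICT (by name: the statement is the Claim_ definition above) =====
theorem check_commutation_spec : Claim_equal_check_commutation := by
  intro pairs _
  unfold Spec_check_commutation check_commutation check_commutation_alt
  rw [show (PySem.Set.empty : PySem.Set Char) = ([] : List Char) from rfl,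
    main_inv _ [] List.nodup_nil]
  cases h : collectB (PySem.Chars.split₀ (PySem.Chars.upper pairs.toList)) [] with
  | none => rfl
  | some ls =>
    simp only [List.nil_append]
    have := length_ofList_eq_iff ls
    simp only [PySem.Set.len]
    by_cases hnd : ls.Nodup
    · simp [hnd, this.mpr hnd]
    · have : (PySem.Set.ofList ls).length ≠ ls.length := fun h2 => hnd (this.mp h2)
      simp [hnd, this]
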